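-- pv_equiv track=rewrite | github.com/Anand191/AppliedDL | main.py | _char_pos_to_word_index
-- ===== SOURCE A (Python) =====
-- def _char_pos_to_word_index(text, start_char, end_char=False):
--     char_counts = list(map(lambda word: len(word) + 1, text.split(" ")))
--
--     start_word = -1
--     end_word = -1
--
--     char_sum = 0
--     for i, word_length in enumerate(char_counts):
--         if char_sum >= start_char:
--             # found the start
--             start_word = i
--             break
--         else:
--             char_sum += word_length
--
--     if end_char:
--         for i, word_length in enumerate(list(char_counts)[start_word:]):
--             char_sum += word_length
--             if char_sum >= end_char:
--                 # found the end
--                 end_word = start_word + i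
--                 break
--     else:
--         end_word = start_word
--
--     return start_word
-- ===== SOURCE B (Python) =====
-- def _char_pos_to_word_index(text, start_char, end_char=False):
--     # Binary search over a precomputed prefix-sum list instead of A's linear
--     # accumulation loop; A's end_char block is dead code (the return value is
--     # always start_word) and is dropped.
--     counts = [len(w) + 1 for w in text.split(" ")]
--     prefix = [0]
--     s = 0
--     for c in counts:
--         s += c
--         prefix.append(s)
--     lo, hi = 0, len(counts)
--     while lo < hi:
--         mid = (lo + hi) // 2
--         if prefix[mid] < start_char:
--             lo = mid + 1
--         else:
--             hi = mid
--     return lo if lo < len(counts) else -1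
-- ===== Notes on version B (the rewrite author's own statement) =====
-- stated objective: alternative
-- what changed: Replaces A's linear accumulate-and-break scan over word lengths with a prefix-sum array plus a hand-written bisect_left binary search, and drops A's dead end_char block (which never affects the return value).
import Mathlib
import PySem

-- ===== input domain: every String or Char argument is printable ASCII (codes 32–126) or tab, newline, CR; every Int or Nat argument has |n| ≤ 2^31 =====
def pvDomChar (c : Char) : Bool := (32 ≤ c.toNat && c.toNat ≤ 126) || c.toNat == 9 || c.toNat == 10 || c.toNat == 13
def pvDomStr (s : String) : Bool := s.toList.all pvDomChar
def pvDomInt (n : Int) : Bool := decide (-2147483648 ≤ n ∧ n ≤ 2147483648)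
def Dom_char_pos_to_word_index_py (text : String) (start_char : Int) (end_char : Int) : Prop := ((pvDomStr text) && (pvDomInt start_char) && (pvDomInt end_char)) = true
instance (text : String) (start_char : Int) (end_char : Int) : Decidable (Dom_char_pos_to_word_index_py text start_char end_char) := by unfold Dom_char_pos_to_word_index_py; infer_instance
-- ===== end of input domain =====

-- B replaces A's linear accumulate-and-break scan with a prefix-sum list plus a
-- bisect_left-style binary search (alternative algorithm; A's end_char block is dead code).


-- ===== PORT A =====
-- text.split(" "): sep is the literal " " (never ""), so PySem.Str.split? is always `some`
def pvSplit (text : String) : List String := (PySem.Str.split? text " ").getD []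

-- the for-loop with break: start_word = first i with char_sum ≥ start_char, else -1
def pvALoop (start_char : Int) : List Int → Int → Int → Int
  | [], _, _ => -1
  | word_length :: rest, i, char_sum =>
    if char_sum ≥ start_char then i
    else pvALoop start_char rest (i + 1) (char_sum + word_length)

def char_pos_to_word_index_py (text : String) (start_char : Int) (end_char : Int) : Int :=
  let char_counts := (pvSplit text).map (fun word => PySem.Str.len word + 1)
  let start_word := pvALoop start_char char_counts 0 0
  -- A's `if end_char:` branch only updates char_sum/end_word, both unused: the
  -- function returns start_word on every path, so the branch is dead code.
  start_word

-- ===== PORT B =====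
-- prefix.append(s) loop of Source B: state is (prefix, s)
def pvPrefixStep (acc : List Int × Int) (c : Int) : List Int × Int :=
  (acc.1 ++ [acc.2 + c], acc.2 + c)

-- hand-written bisect_left while-loop of Source B; mid = (lo + hi) // 2 is inlined.
-- The loop runs at most hi - lo times (the gap shrinks each iteration), so a fuel of
-- hi - lo makes it total by structural recursion; with enough fuel the guard never fires.
def pvBsearch (pre : List Int) (x : Int) : Nat → Nat → Nat → Nat
  | 0, lo, _ => lo
  | fuel + 1, lo, hi =>
    if lo < hi then
      if PySem.List.pyGetD pre (((lo + hi) / 2 : Nat) : Int) 0 < x then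
        pvBsearch pre x fuel ((lo + hi) / 2 + 1) hi
      else
        pvBsearch pre x fuel lo ((lo + hi) / 2)
    else lo

def char_pos_to_word_index_py_alt (text : String) (start_char : Int) (end_char : Int) : Int :=
  let counts := (pvSplit text).map (fun word => PySem.Str.len word + 1)
  let ps := counts.foldl pvPrefixStep ([(0 : Int)], 0)
  let lo := pvBsearch ps.1 start_char counts.length 0 counts.length
  if lo < counts.length then (lo : Int) else -1

-- ===== PRECONDITION & SPEC =====
def Spec_char_pos_to_word_index_py (text : String) (start_char : Int) (end_char : Int) (out : Int) : Prop := out = char_pos_to_word_index_py_alt text start_char end_char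
instance (text : String) (start_char : Int) (end_char : Int) (out : Int) : Decidable (Spec_char_pos_to_word_index_py text start_char end_char out) := by unfold Spec_char_pos_to_word_index_py; infer_instance

-- ===== CLAIM (what is proved, stated in full; the proofs are below) =====
def Claim_equal_char_pos_to_word_index_py : Prop := ∀ (text : String) (start_char : Int) (end_char : Int), Dom_char_pos_to_word_index_py text start_char end_char → Spec_char_pos_to_word_index_py text start_char end_char (char_pos_to_word_index_py text start_char end_char)

-- ===== LEMMAS AND PROOFS =====

-- the running sums after each element (B's prefix list is 0 :: pvSums 0 cs)
def pvSums (s : Int) : List Int → List Int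
  | [] => []
  | c :: cs => (s + c) :: pvSums (s + c) cs

-- the sums *before* each element (what A's loop compares against)
def pvPrefixes (s : Int) : List Int → List Int
  | [] => []
  | c :: cs => s :: pvPrefixes (s + c) cs

theorem pvPrefixes_length (cs : List Int) : ∀ s, (pvPrefixes s cs).length = cs.length := by
  induction cs with
  | nil => intro s; rfl
  | cons c cs ih => intro s; simp [pvPrefixes, ih]

theorem pvALoop_eq (x : Int) (cs : List Int) : ∀ i s : Int,
    pvALoop x cs i s =
      (if (pvPrefixes s cs).findIdx (fun p => decide (x ≤ p)) < cs.length
        then i + ((pvPrefixes s cs).findIdx (fun p => decide (x ≤ p)) : Int) else -1) := by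
  induction cs with
  | nil => intro i s; simp [pvALoop, pvPrefixes]
  | cons c cs ih =>
    intro i s
    by_cases hx : x ≤ s
    · simp [pvALoop, pvPrefixes, List.findIdx_cons, hx]
    · simp only [pvALoop, pvPrefixes, List.findIdx_cons, ge_iff_le, hx, decide_false,
        cond_false, if_false, List.length_cons]
      rw [ih (i + 1) (s + c)]
      by_cases h : (pvPrefixes (s + c) cs).findIdx (fun p => decide (x ≤ p)) < cs.length
      · rw [if_pos h, if_pos (by omega)]
        push_cast; ring
      · rw [if_neg h, if_neg (by omega)]

theorem pvFold_eq (cs : List Int) : ∀ (P : List Int) (s : Int),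
    cs.foldl pvPrefixStep (P, s) = (P ++ pvSums s cs, s + cs.sum) := by
  induction cs with
  | nil => intro P s; simp [pvSums]
  | cons c cs ih =>
    intro P s
    simp only [List.foldl_cons, pvPrefixStep, pvSums, ih, List.sum_cons, List.append_assoc,
      List.singleton_append, Prod.mk.injEq]
    exact ⟨trivial, by ring⟩

theorem pvSums_eq_prefixes (cs : List Int) : ∀ s : Int,
    s :: pvSums s cs = pvPrefixes s cs ++ [s + cs.sum] := by
  induction cs with
  | nil => intro s; simp [pvSums, pvPrefixes]
  | cons c cs ih =>
    intro s
    simp only [pvSums, pvPrefixes, List.cons_append, List.sum_cons]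
    rw [← add_assoc, ← ih (s + c)]

theorem pvChain (cs : List Int) : ∀ s : Int, (∀ c ∈ cs, 0 ≤ c) →
    List.IsChain (· ≤ ·) (s :: pvSums s cs) := by
  induction cs with
  | nil => intro s _; simp [pvSums]
  | cons c cs ih =>
    intro s hc
    have h0 : (0:Int) ≤ c := hc c (by simp)
    simp only [pvSums, List.isChain_cons_cons]
    exact ⟨by omega, ih (s + c) (fun d hd => hc d (by simp [hd]))⟩

-- result characterization of the binary search (searching the first n entries of P)
theorem pvBsearch_spec (P : List Int) (x : Int) (n : Nat) (hn : n ≤ P.length)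
    (hmono : ∀ j k : Nat, j ≤ k → k < P.length → P.getD j 0 ≤ P.getD k 0) :
    ∀ (fuel lo hi : Nat), hi - lo ≤ fuel → lo ≤ hi → hi ≤ n →
    (∀ j < lo, P.getD j 0 < x) → (∀ j, hi ≤ j → j < n → x ≤ P.getD j 0) →
    lo ≤ pvBsearch P x fuel lo hi ∧ pvBsearch P x fuel lo hi ≤ hi ∧
      (∀ j < pvBsearch P x fuel lo hi, P.getD j 0 < x) ∧
      (∀ j, pvBsearch P x fuel lo hi ≤ j → j < n → x ≤ P.getD j 0) := by
  intro fuel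
  induction fuel with
  | zero =>
    intro lo hi hfuel hlo hhi hlow hhigh
    have heq : lo = hi := by omega
    subst heq
    rw [pvBsearch]
    exact ⟨le_rfl, le_rfl, hlow, fun j hj hjl => hhigh j hj hjl⟩
  | succ fuel ih =>
    intro lo hi hfuel hlo hhi hlow hhigh
    by_cases h : lo < hi
    · rw [pvBsearch, if_pos h]
      by_cases hlt : PySem.List.pyGetD P (((lo + hi) / 2 : Nat) : Int) 0 < x
      · rw [if_pos hlt]
        simp only [PySem.List.pyGetD_natCast] at hlt
        have := ih ((lo + hi) / 2 + 1) hi (by omega) (by omega) hhi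
          (fun j hj => by
            by_cases hje : j ≤ (lo + hi) / 2
            · exact lt_of_le_of_lt (hmono j ((lo + hi) / 2) hje (by omega)) hlt
            · exact hlow j (by omega))
          hhigh
        exact ⟨by omega, this.2.1, this.2.2.1, this.2.2.2⟩
      · rw [if_neg hlt]
        simp only [PySem.List.pyGetD_natCast, not_lt] at hlt
        have := ih lo ((lo + hi) / 2) (by omega) (by omega) (by omega) hlow
          (fun j hj hjl => le_trans hlt (hmono ((lo + hi) / 2) j hj (by omega)))
        exact ⟨this.1, by omega, this.2.2.1, this.2.2.2⟩
    · rw [pvBsearch, if_neg h]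
      exact ⟨le_rfl, hlo, hlow, fun j hj hjl => hhigh j (by omega) hjl⟩

theorem pvFindIdx_eq (p : Int → Bool) (Q : List Int) : ∀ r : Nat, r ≤ Q.length →
    (∀ j : Nat, j < r → p (Q.getD j 0) = false) →
    (∀ h : r < Q.length, p (Q.getD r 0) = true) →
    Q.findIdx p = r := by
  induction Q with
  | nil =>
    intro r hr _ _
    simp only [List.length_nil, Nat.le_zero] at hr
    subst hr
    simp
  | cons q Q ih =>
    intro r hr hlow hhigh
    cases r with
    | zero =>
      have := hhigh (by simp)
      simp only [List.getD_cons_zero] at this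
      simp [List.findIdx_cons, this]
    | succ r =>
      have h0 : p q = false := by simpa using hlow 0 (by omega)
      simp only [List.findIdx_cons, h0, cond_false]
      rw [ih r (by simpa using hr)
        (fun j hj => by simpa using hlow (j + 1) (by omega))
        (fun h => by simpa using hhigh (by simpa using Nat.succ_lt_succ h))]

theorem pvMain (counts : List Int) (x : Int) (hc : ∀ c ∈ counts, 0 ≤ c) :
    pvALoop x counts 0 0 =
      (if pvBsearch (counts.foldl pvPrefixStep ([(0:Int)], 0)).1 x counts.length 0 counts.length < counts.length
        then (pvBsearch (counts.foldl pvPrefixStep ([(0:Int)], 0)).1 x counts.length 0 counts.length : Int)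
        else -1) := by
  have hfold : (counts.foldl pvPrefixStep ([(0:Int)], 0)).1 = 0 :: pvSums 0 counts := by
    rw [pvFold_eq]; simp
  rw [hfold]
  set P : List Int := 0 :: pvSums 0 counts with hP
  set Q : List Int := pvPrefixes 0 counts with hQ
  set n := counts.length with hn
  have hPQ : P = Q ++ [0 + counts.sum] := pvSums_eq_prefixes counts 0
  have hQlen : Q.length = n := pvPrefixes_length counts 0
  have hPlen : P.length = n + 1 := by rw [hPQ]; simp [hQlen]
  have hchain : List.IsChain (· ≤ ·) P := pvChain counts 0 hc
  have hmono : ∀ j k : Nat, j ≤ k → k < P.length → P.getD j 0 ≤ P.getD k 0 := by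
    intro j k hjk hk
    rcases Nat.eq_or_lt_of_le hjk with rfl | hlt
    · exact le_rfl
    · have hp := (List.isChain_iff_pairwise).mp hchain
      have hj : j < P.length := by omega
      have := List.pairwise_iff_getElem.mp hp j k hj hk hlt
      simpa [List.getD_eq_getElem?_getD, List.getElem?_eq_getElem, hk, hj] using this
  have hbs := pvBsearch_spec P x n (by omega) hmono n 0 n (by omega) (by omega) le_rfl
    (by omega) (by omega)
  set r := pvBsearch P x n 0 n with hr
  have hgd : ∀ j : Nat, j < n → P.getD j 0 = Q.getD j 0 := by
    intro j hj
    rw [hPQ, List.getD_eq_getElem?_getD, List.getElem?_append_left (by omega),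
      ← List.getD_eq_getElem?_getD]
  have hfind : Q.findIdx (fun p => decide (x ≤ p)) = r := by
    apply pvFindIdx_eq
    · omega
    · intro j hj
      have hjn : j < n := by omega
      rw [← hgd j hjn]
      simpa using not_le.mpr (hbs.2.2.1 j hj)
    · intro h
      have hrn : r < n := by omega
      rw [← hgd r hrn]
      simpa using hbs.2.2.2 r le_rfl hrn
  rw [pvALoop_eq, ← hQ, hfind, ← hn]
  split <;> simp

-- ===== VERDICT (by name: the statement is the Claim_ definition above) =====
theorem char_pos_to_word_index_py_spec : Claim_equal_char_pos_to_word_index_py := by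
  intro text start_char end_char _
  unfold Spec_char_pos_to_word_index_py char_pos_to_word_index_py char_pos_to_word_index_py_alt
  exact pvMain _ start_char (by
    intro c hc
    simp only [List.mem_map] at hc
    obtain ⟨w, _, rfl⟩ := hc
    rw [PySem.Str.len_eq]
    omega)
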